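-- pv_equiv track=rewrite | github.com/Suhas030/DressPromain | back-end/app/import_amazon_products.py | get_image_url
-- ===== SOURCE A (Python) =====
-- def get_image_url(images):
--     """Extract best image URL from images array"""
--     if not images or len(images) == 0:
--         return "https://via.placeholder.com/500x600?text=No+Image"
--
--     # Prefer hi_res images
--     for img in images:
--         if 'hi_res' in img and img['hi_res']:
--             return img['hi_res']
--
--     # Fallback to large
--     for img in images:
--         if 'large' in img and img['large']:
--             return img['large']
--
--     # Last resort
--     return images[0].get('thumb', "https://via.placeholder.com/500x600?text=No+Image")
-- ===== SOURCE B (Python) =====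
-- def get_image_url(images):
--     """Extract best image URL from images array (single pass with remembered fallback)."""
--     placeholder = "https://via.placeholder.com/500x600?text=No+Image"
--     if not images:
--         return placeholder
--     large = None
--     for img in images:
--         hi = img.get('hi_res')
--         if hi:
--             return hi
--         if large is None:
--             l = img.get('large')
--             if l:
--                 large = l
--     if large is not None:
--         return large
--     return images[0].get('thumb', placeholder)
-- ===== Notes on version B (the rewrite author's own statement) =====
-- stated objective: simpler
-- what changed: Replaces A's two sequential scans (one for hi_res, one for large) by a single traversal that returns the first truthy hi_res immediately and remembers the first truthy large as a deferred fallback.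
import Mathlib
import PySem

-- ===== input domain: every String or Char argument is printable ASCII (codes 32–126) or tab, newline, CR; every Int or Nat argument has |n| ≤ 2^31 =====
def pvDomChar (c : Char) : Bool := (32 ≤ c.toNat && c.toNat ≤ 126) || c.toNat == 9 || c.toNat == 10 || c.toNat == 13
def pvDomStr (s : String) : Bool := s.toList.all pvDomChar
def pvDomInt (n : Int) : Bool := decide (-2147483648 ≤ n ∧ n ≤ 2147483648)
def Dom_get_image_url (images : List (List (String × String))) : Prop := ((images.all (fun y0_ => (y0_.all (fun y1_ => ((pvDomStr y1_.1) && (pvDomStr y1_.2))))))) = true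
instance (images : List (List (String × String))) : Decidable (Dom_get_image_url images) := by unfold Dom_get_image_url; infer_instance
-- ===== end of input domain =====

-- B collapses A's two sequential scans into one traversal that remembers the first truthy 'large' as a deferred fallback (objective: simpler).


-- dict lookup (assoc list, first match), shared primitive: Python's img.get(k) / 'k in img' + img[k]
def pvLookup (img : List (String × String)) (k : String) : Option String :=
  (img.find? (fun p => p.1 == k)).map (·.2)

def pvPlaceholder : String := "https://via.placeholder.com/500x600?text=No+Image"

-- ===== PORT A =====
-- first loop: for img in images: if 'hi_res' in img and img['hi_res']: return img['hi_res']
def aLoopHi : List (List (String × String)) → Option String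
  | [] => none
  | img :: rest =>
    match pvLookup img "hi_res" with
    | some v => if v ≠ "" then some v else aLoopHi rest
    | none => aLoopHi rest

-- second loop: for img in images: if 'large' in img and img['large']: return img['large']
def aLoopLarge : List (List (String × String)) → Option String
  | [] => none
  | img :: rest =>
    match pvLookup img "large" with
    | some v => if v ≠ "" then some v else aLoopLarge rest
    | none => aLoopLarge rest

def get_image_url (images : List (List (String × String))) : String :=
  match images with
  | [] => pvPlaceholder
  | img0 :: _ =>
    match aLoopHi images with
    | some v => v
    | none =>
      match aLoopLarge images with
      | some v => v
      | none => (pvLookup img0 "thumb").getD pvPlaceholder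

-- ===== PORT B =====
-- single pass: return first truthy hi_res; remember the first truthy large in the accumulator
def bLoop (img0 : List (List (String × String))) (large : Option String) :
    List (List (String × String)) → String
  | [] =>
    match large with
    | some l => l
    | none =>
      match img0 with
      | [] => pvPlaceholder
      | i0 :: _ => (pvLookup i0 "thumb").getD pvPlaceholder
  | img :: rest =>
    match pvLookup img "hi_res" with
    | some hi =>
      if hi ≠ "" then hi
      else bLoop img0 (bUpd large img) rest
    | none => bLoop img0 (bUpd large img) rest
where
  bUpd (large : Option String) (img : List (String × String)) : Option String :=
    match large with
    | some _ => large
    | none =>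
      match pvLookup img "large" with
      | some l => if l ≠ "" then some l else none
      | none => none

def get_image_url_alt (images : List (List (String × String))) : String :=
  match images with
  | [] => pvPlaceholder
  | _ :: _ => bLoop images none images

-- ===== PRECONDITION & SPEC =====
def Spec_get_image_url (images : List (List (String × String))) (out : String) : Prop := out = get_image_url_alt images
instance (images : List (List (String × String))) (out : String) : Decidable (Spec_get_image_url images out) := by unfold Spec_get_image_url; infer_instance

-- ===== CLAIM (what is proved, stated in full; the proofs are below) =====
def Claim_equal_get_image_url : Prop := ∀ (images : List (List (String × String))), Dom_get_image_url images → Spec_get_image_url images (get_image_url images)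

-- ===== LEMMAS AND PROOFS =====

-- characterisation of B's loop: first hi_res wins; else the remembered large, else the scan for large; else thumb of img0's head
theorem bLoop_eq (l : List (List (String × String))) (img0 : List (List (String × String)))
    (large : Option String) :
    bLoop img0 large l =
      match aLoopHi l with
      | some v => v
      | none =>
        match large.orElse (fun _ => aLoopLarge l) with
        | some v => v
        | none =>
          match img0 with
          | [] => pvPlaceholder
          | i0 :: _ => (pvLookup i0 "thumb").getD pvPlaceholder := by
  induction l generalizing large with
  | nil => cases large <;> simp [bLoop, aLoopHi, aLoopLarge, Option.orElse]
  | cons img rest ih =>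
    simp only [bLoop, aLoopHi, aLoopLarge]
    cases h : pvLookup img "hi_res" with
    | none =>
      rw [ih]
      cases large <;> simp [bLoop.bUpd, Option.orElse] <;>
        cases h2 : pvLookup img "large" <;> simp [Option.orElse] <;> split_ifs <;> simp
    | some v =>
      by_cases hv : v = "" <;> simp [hv]
      rw [ih]
      cases large <;> simp [bLoop.bUpd, Option.orElse] <;>
        cases h2 : pvLookup img "large" <;> simp [Option.orElse] <;> split_ifs <;> simp

-- ===== VERDICT (by name: the statement is the Claim_ definition above) =====
theorem get_image_url_spec : Claim_equal_get_image_url := by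
  intro images _
  unfold Spec_get_image_url get_image_url get_image_url_alt
  cases images with
  | nil => rfl
  | cons img0 rest =>
    rw [bLoop_eq]
    simp [Option.orElse]
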